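-- pv_equiv track=rewrite | github.com/CSZSmaf/aoryn | desktop_agent/web_agent.py | _looks_like_cookie_labels
-- ===== SOURCE A (Python) =====
-- def _looks_like_cookie_labels(labels: tuple[str, ...]) -> bool:
--     has_accept = any("accept" in label or "agree" in label for label in labels)
--     has_reject = any(
--         keyword in label
--         for label in labels
--         for keyword in ("reject", "decline", "necessary", "preferences", "settings")
--     )
--     return has_accept and has_reject
-- ===== SOURCE B (Python) =====
-- def _looks_like_cookie_labels(labels: tuple[str, ...]) -> bool:
--     has_accept = False
--     has_reject = False
--     for label in labels:
--         has_accept = has_accept or "accept" in label or "agree" in label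
--         has_reject = has_reject or any(
--             k in label for k in ("reject", "decline", "necessary", "preferences", "settings")
--         )
--         if has_accept and has_reject:
--             return True
--     return has_accept and has_reject
-- ===== Notes on version B (the rewrite author's own statement) =====
-- stated objective: alternative
-- what changed: Replaces the two separate any() scans over labels with a single pass that maintains has_accept/has_reject flags and returns early once both are set.
import Mathlib
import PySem

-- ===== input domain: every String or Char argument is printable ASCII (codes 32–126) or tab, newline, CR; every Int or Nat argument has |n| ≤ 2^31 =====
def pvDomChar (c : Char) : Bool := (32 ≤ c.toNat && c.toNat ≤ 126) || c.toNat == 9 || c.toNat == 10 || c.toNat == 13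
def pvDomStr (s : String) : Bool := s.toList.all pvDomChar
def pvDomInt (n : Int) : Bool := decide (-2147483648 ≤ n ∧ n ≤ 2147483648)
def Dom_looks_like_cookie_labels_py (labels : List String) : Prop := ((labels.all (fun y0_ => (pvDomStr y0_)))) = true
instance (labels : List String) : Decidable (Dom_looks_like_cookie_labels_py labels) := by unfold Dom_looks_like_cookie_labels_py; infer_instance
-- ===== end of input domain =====

-- B replaces A's two separate any() scans with one early-exiting pass keeping two flags (alternative decomposition, same cost).

-- ===== PORT A =====
def looks_like_cookie_labels_py (labels : List String) : Bool :=
  let has_accept := labels.any (fun label => PySem.Str.isIn "accept" label || PySem.Str.isIn "agree" label)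
  let has_reject := labels.any (fun label =>
    (["reject", "decline", "necessary", "preferences", "settings"] : List String).any
      (fun keyword => PySem.Str.isIn keyword label))
  has_accept && has_reject

-- ===== PORT B =====
-- single pass over labels carrying the two flags; returns true early once both hold
def looks_like_cookie_labels_py_alt_go : List String → Bool → Bool → Bool
  | [], has_accept, has_reject => has_accept && has_reject
  | label :: rest, has_accept, has_reject =>
    let ha := has_accept || PySem.Str.isIn "accept" label || PySem.Str.isIn "agree" label
    let hr := has_reject ||
      (["reject", "decline", "necessary", "preferences", "settings"] : List String).any
        (fun k => PySem.Str.isIn k label)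
    if ha && hr then true else looks_like_cookie_labels_py_alt_go rest ha hr

def looks_like_cookie_labels_py_alt (labels : List String) : Bool :=
  looks_like_cookie_labels_py_alt_go labels false false

-- ===== PRECONDITION & SPEC =====
def Spec_looks_like_cookie_labels_py (labels : List String) (out : Bool) : Prop := out = looks_like_cookie_labels_py_alt labels
instance (labels : List String) (out : Bool) : Decidable (Spec_looks_like_cookie_labels_py labels out) := by unfold Spec_looks_like_cookie_labels_py; infer_instance

-- ===== CLAIM (what is proved, stated in full; the proofs are below) =====
def Claim_equal_looks_like_cookie_labels_py : Prop := ∀ (labels : List String), Dom_looks_like_cookie_labels_py labels → Spec_looks_like_cookie_labels_py labels (looks_like_cookie_labels_py labels)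

-- ===== LEMMAS AND PROOFS =====
theorem looks_like_cookie_labels_py_alt_go_eq (rest : List String) (ha hr : Bool) :
    looks_like_cookie_labels_py_alt_go rest ha hr =
      ((ha || rest.any (fun label => PySem.Str.isIn "accept" label || PySem.Str.isIn "agree" label)) &&
       (hr || rest.any (fun label =>
          (["reject", "decline", "necessary", "preferences", "settings"] : List String).any
            (fun k => PySem.Str.isIn k label)))) := by
  induction rest generalizing ha hr with
  | nil => simp [looks_like_cookie_labels_py_alt_go]
  | cons l t ih =>
    simp only [looks_like_cookie_labels_py_alt_go, ih, List.any_cons, List.any_nil, Bool.or_false]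
    generalize PySem.Str.isIn "accept" l = a1
    generalize PySem.Str.isIn "agree" l = a2
    generalize PySem.Str.isIn "reject" l = r1
    generalize PySem.Str.isIn "decline" l = r2
    generalize PySem.Str.isIn "necessary" l = r3
    generalize PySem.Str.isIn "preferences" l = r4
    generalize PySem.Str.isIn "settings" l = r5
    generalize (t.any fun label => PySem.Str.isIn "accept" label || PySem.Str.isIn "agree" label) = X
    generalize (t.any fun label =>
      PySem.Str.isIn "reject" label ||
        (PySem.Str.isIn "decline" label ||
          (PySem.Str.isIn "necessary" label ||
            (PySem.Str.isIn "preferences" label || PySem.Str.isIn "settings" label)))) = Y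
    revert ha hr a1 a2 r1 r2 r3 r4 r5 X Y
    decide

-- ===== VERDICT (by name: the statement is the Claim_ definition above) =====
theorem looks_like_cookie_labels_py_spec : Claim_equal_looks_like_cookie_labels_py := by
  intro labels _
  unfold Spec_looks_like_cookie_labels_py looks_like_cookie_labels_py looks_like_cookie_labels_py_alt
  rw [looks_like_cookie_labels_py_alt_go_eq]
  simp
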